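-- pv_equiv track=rewrite | github.com/ku-formal/SmarTrim-Artifact | scripts/inspect_callgraph.py | _contains_target
-- ===== SOURCE A (Python) =====
-- def _contains_target(src: str) -> bool:
--     targets = ['SEND', 'Transfer dest:', 'selfdestruct', 'suicide']
--     for t in targets:
--         if t in src:
--             return True
--     l = src.splitlines()
--     for line in l:
--         if 'HIGH_LEVEL_CALL' in line and 'value:' in line:
--             return True
--         if 'LOW_LEVEL_CALL' in line and 'value:' in line:
--             return True
--     return False
-- ===== SOURCE B (Python) =====
-- # Single pass over the lines: every pattern is newline-free, so a whole-source
-- # substring search is equivalent to a per-line one.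
-- _LINE_TARGETS = ('SEND', 'Transfer dest:', 'selfdestruct', 'suicide')
--
--
-- def _contains_target(src: str) -> bool:
--     for line in src.splitlines():
--         if any(t in line for t in _LINE_TARGETS):
--             return True
--         if 'value:' in line and ('HIGH_LEVEL_CALL' in line or 'LOW_LEVEL_CALL' in line):
--             return True
--     return False
-- ===== Notes on version B (the rewrite author's own statement) =====
-- stated objective: simpler
-- what changed: B replaces A's two sequential scans (whole-string search for the four targets, then a second loop over splitlines for the CALL+value patterns) by one pass over src.splitlines() checking all six patterns per line, relying on all patterns being newline-free.
import Mathlib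
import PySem

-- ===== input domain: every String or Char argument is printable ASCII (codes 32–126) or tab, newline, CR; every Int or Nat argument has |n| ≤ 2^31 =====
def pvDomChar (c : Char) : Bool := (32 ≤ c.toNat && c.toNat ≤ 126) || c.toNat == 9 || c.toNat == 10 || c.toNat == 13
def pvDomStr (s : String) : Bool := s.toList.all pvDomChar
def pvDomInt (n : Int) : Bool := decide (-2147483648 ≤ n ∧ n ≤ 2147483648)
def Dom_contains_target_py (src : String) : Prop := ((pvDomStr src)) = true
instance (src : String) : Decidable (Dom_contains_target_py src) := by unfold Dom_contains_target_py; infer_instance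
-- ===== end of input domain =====

-- B merges A's two sequential scans (whole-string target search, then a per-line loop)
-- into one pass over splitlines; objective: simpler, same behaviour.

-- ===== PORT A =====
def contains_target_py (src : String) : Bool :=
  let targets : List String := ["SEND", "Transfer dest:", "selfdestruct", "suicide"]
  if targets.any (fun t => PySem.Str.isIn t src) then true
  else
    let l := PySem.Str.splitlines src
    l.any (fun line =>
      if PySem.Str.isIn "HIGH_LEVEL_CALL" line && PySem.Str.isIn "value:" line then true
      else if PySem.Str.isIn "LOW_LEVEL_CALL" line && PySem.Str.isIn "value:" line then true
      else false)

-- ===== PORT B =====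
def pvLineTargets : List String := ["SEND", "Transfer dest:", "selfdestruct", "suicide"]

def contains_target_py_alt (src : String) : Bool :=
  (PySem.Str.splitlines src).any (fun line =>
    if pvLineTargets.any (fun t => PySem.Str.isIn t line) then true
    else PySem.Str.isIn "value:" line &&
      (PySem.Str.isIn "HIGH_LEVEL_CALL" line || PySem.Str.isIn "LOW_LEVEL_CALL" line))

-- ===== PRECONDITION & SPEC =====
def Spec_contains_target_py (src : String) (out : Bool) : Prop := out = contains_target_py_alt src
instance (src : String) (out : Bool) : Decidable (Spec_contains_target_py src out) := by unfold Spec_contains_target_py; infer_instance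

-- ===== CLAIM (what is proved, stated in full; the proofs are below) =====
def Claim_equal_contains_target_py : Prop := ∀ (src : String), Dom_contains_target_py src → Spec_contains_target_py src (contains_target_py src)

-- ===== LEMMAS AND PROOFS =====

-- Specification-side view of splitlines: glue a pending prefix onto the first line.
def pvGlue (p : List Char) (ls : List (List Char)) : List (List Char) :=
  if p = [] then ls
  else match ls with
  | [] => [p]
  | l :: t => (p ++ l) :: t

def pvLines (isB : Char → Bool) : List Char → List (List Char)
  | [] => []
  | '\x0d' :: '\n' :: rest => [] :: pvLines isB rest
  | c :: rest => if isB c then [] :: pvLines isB rest else pvGlue [c] (pvLines isB rest)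

theorem pvGo_eq (isB : Char → Bool) (s cur : List Char) (acc : List (List Char)) :
    PySem.Chars.splitlines.go isB s cur acc
      = acc.reverse ++ pvGlue cur.reverse (pvLines isB s) := by
  induction s, cur, acc using PySem.Chars.splitlines.go.induct isB with
  | case1 cur acc h =>
    simp at h
    simp [PySem.Chars.splitlines.go, h, pvLines, pvGlue]
  | case2 cur acc h =>
    simp at h
    simp [PySem.Chars.splitlines.go, pvLines, pvGlue, h]
  | case3 rest cur acc ih =>
    simp [PySem.Chars.splitlines.go, pvLines, ih, pvGlue]
  | case4 c rest cur acc hne hB ih =>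
    simp [PySem.Chars.splitlines.go, pvLines, hB, ih, pvGlue]
  | case5 c rest cur acc hne hB ih =>
    simp [PySem.Chars.splitlines.go, pvLines, hB, ih, pvGlue]
    by_cases hcur : cur = [] <;>
      rcases h : pvLines isB rest with _ | ⟨l, t⟩ <;> simp [hcur]

-- the break test of PySem.Chars.splitlines, named
def pvIsB (c : Char) : Bool :=
  decide (c.toNat = 10) || decide (c.toNat = 13) || decide (c.toNat = 11) ||
  decide (c.toNat = 12) || decide (c.toNat = 28) || decide (c.toNat = 29) ||
  decide (c.toNat = 30) || decide (c.toNat = 133) || decide (c.toNat = 8232) ||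
  decide (c.toNat = 8233)

theorem pvSplitlines_eq (s : List Char) :
    PySem.Chars.splitlines s = pvLines pvIsB s := by
  show PySem.Chars.splitlines.go pvIsB s [] [] = pvLines pvIsB s
  rw [pvGo_eq]
  simp [pvGlue]

theorem pvIsIn_nil {sub : List Char} (h : sub ≠ []) :
    PySem.Chars.isIn sub [] = false := by
  rw [PySem.Chars.isIn_eq_false_iff, List.infix_nil]; exact h

theorem pvIsIn_cons_of_notMem {sub : List Char} {c : Char} (t : List Char) (h : c ∉ sub) :
    PySem.Chars.isIn sub (c :: t) = PySem.Chars.isIn sub t := by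
  rw [Bool.eq_iff_iff, PySem.Chars.isIn_iff_infix, PySem.Chars.isIn_iff_infix]
  constructor
  · intro hin
    rcases List.infix_cons_iff.mp hin with hp | hi
    · cases sub with
      | nil => exact List.nil_infix
      | cons d sub' =>
        rcases List.cons_prefix_cons.mp hp with ⟨rfl, _⟩
        exact absurd List.mem_cons_self h
    · exact hi
  · exact List.infix_cons

theorem pvLines_eq_nil {isB : Char → Bool} {s : List Char} :
    pvLines isB s = [] ↔ s = [] := by
  induction s using pvLines.induct isB with
  | case1 => simp [pvLines]
  | case2 rest _ => simp [pvLines]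
  | case3 c rest hne hB ih => simp [pvLines, hB]
  | case4 c rest hne hB ih =>
    simp only [pvLines, hB, Bool.false_eq_true, if_false]
    rcases h : pvLines isB rest with _ | ⟨l, t⟩ <;> simp [pvGlue]

theorem pvFirstLine_prefix {isB : Char → Bool} {s l : List Char} {t : List (List Char)}
    (h : pvLines isB s = l :: t) : l <+: s := by
  induction s using pvLines.induct isB generalizing l t with
  | case1 => simp [pvLines] at h
  | case2 rest ih =>
    simp only [pvLines] at h
    injection h with h1 _
    subst h1
    exact List.nil_prefix
  | case3 c rest hne hB ih =>
    simp only [pvLines, hB, if_true] at h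
    injection h with h1 _
    subst h1
    exact List.nil_prefix
  | case4 c rest hne hB ih =>
    simp only [pvLines, hB, Bool.false_eq_true, if_false] at h
    rcases hP : pvLines isB rest with _ | ⟨l', t'⟩
    · rw [hP] at h
      simp [pvGlue] at h
      rcases h with ⟨rfl, _⟩
      simp
    · rw [hP] at h
      simp [pvGlue] at h
      rcases h with ⟨rfl, _⟩
      exact (List.prefix_cons_inj c).mpr (ih hP)

theorem pvPrefix_first {isB : Char → Bool} {sub s l : List Char} {t : List (List Char)}
    (hsub : ∀ c ∈ sub, isB c = false ∧ c ≠ '\x0d' ∧ c ≠ '\n')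
    (hp : sub <+: s) (h : pvLines isB s = l :: t) : sub <+: l := by
  induction s using pvLines.induct isB generalizing sub l t with
  | case1 => simp [pvLines] at h
  | case2 rest ih =>
    cases sub with
    | nil => exact List.nil_prefix
    | cons d sub' =>
      rcases List.cons_prefix_cons.mp hp with ⟨rfl, _⟩
      exact absurd rfl (hsub _ List.mem_cons_self).2.1
  | case3 c rest hne hB ih =>
    cases sub with
    | nil => exact List.nil_prefix
    | cons d sub' =>
      rcases List.cons_prefix_cons.mp hp with ⟨rfl, _⟩
      exact absurd (hsub _ List.mem_cons_self).1 (by simp [hB])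
  | case4 c rest hne hB ih =>
    simp only [pvLines, hB, Bool.false_eq_true, if_false] at h
    cases sub with
      | nil => exact List.nil_prefix
      | cons d sub' =>
        rcases List.cons_prefix_cons.mp hp with ⟨rfl, hp'⟩
        rcases hP : pvLines isB rest with _ | ⟨l', t'⟩
        · rw [hP] at h
          simp [pvGlue] at h
          rcases h with ⟨rfl, _⟩
          have : rest = [] := pvLines_eq_nil.mp hP
          subst this
          simpa using hp'
        · rw [hP] at h
          simp [pvGlue] at h
          rcases h with ⟨rfl, _⟩
          have hsub' : ∀ c ∈ sub', isB c = false ∧ c ≠ '\x0d' ∧ c ≠ '\n' :=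
            fun c hc => hsub c (List.mem_cons_of_mem _ hc)
          exact (List.prefix_cons_inj d).mpr (ih hsub' hp' hP)

theorem pvIsIn_lines {isB : Char → Bool} {sub : List Char} (s : List Char)
    (hne : sub ≠ [])
    (hsub : ∀ c ∈ sub, isB c = false ∧ c ≠ '\x0d' ∧ c ≠ '\n') :
    PySem.Chars.isIn sub s = (pvLines isB s).any (fun l => PySem.Chars.isIn sub l) := by
  induction s using pvLines.induct isB with
  | case1 => simp [pvLines, pvIsIn_nil hne]
  | case2 rest ih =>
    have hr : '\x0d' ∉ sub := fun hc => (hsub _ hc).2.1 rfl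
    have hn : '\n' ∉ sub := fun hc => (hsub _ hc).2.2 rfl
    rw [pvIsIn_cons_of_notMem _ hr, pvIsIn_cons_of_notMem _ hn]
    simp [pvLines, pvIsIn_nil hne, ih]
  | case3 c rest hne2 hB ih =>
    have hc : c ∉ sub := fun hc => by simp [(hsub _ hc).1] at hB
    rw [pvIsIn_cons_of_notMem _ hc]
    simp [pvLines, hB, pvIsIn_nil hne, ih]
  | case4 c rest hne2 hB ih =>
    simp only [pvLines, hB, Bool.false_eq_true, if_false]
    rcases hP : pvLines isB rest with _ | ⟨l, t⟩
    · have : rest = [] := pvLines_eq_nil.mp hP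
      subst this
      simp [pvGlue]
    · rw [hP] at ih
      have hg : pvGlue [c] (l :: t) = (c :: l) :: t := by simp [pvGlue]
      rw [hg, Bool.eq_iff_iff]
      simp only [List.any_cons, Bool.or_eq_true, PySem.Chars.isIn_iff_infix]
      have ihp : sub <:+: rest ↔ (sub <:+: l ∨ (t.any (fun l => PySem.Chars.isIn sub l) = true)) := by
        rw [← PySem.Chars.isIn_iff_infix, ih]
        simp [PySem.Chars.isIn_iff_infix]
      constructor
      · intro hin
        rcases List.infix_cons_iff.mp hin with hp | hi
        · cases sub with
          | nil => exact absurd rfl hne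
          | cons d sub' =>
            rcases List.cons_prefix_cons.mp hp with ⟨rfl, hp'⟩
            have hsub' : ∀ c ∈ sub', isB c = false ∧ c ≠ '\x0d' ∧ c ≠ '\n' :=
              fun c hc => hsub c (List.mem_cons_of_mem _ hc)
            left
            exact (List.prefix_cons_inj d).mpr (pvPrefix_first hsub' hp' hP) |>.isInfix
        · rcases ihp.mp hi with h1 | h2
          · exact Or.inl (List.infix_cons h1)
          · exact Or.inr h2
      · intro hin
        rcases hin with h1 | h2
        · rcases List.infix_cons_iff.mp h1 with hp | hi
          · cases sub with
            | nil => exact absurd rfl hne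
            | cons d sub' =>
              rcases List.cons_prefix_cons.mp hp with ⟨rfl, hp'⟩
              have : sub' <+: rest := hp'.trans (pvFirstLine_prefix hP)
              exact (List.infix_cons_iff.mpr (Or.inl ((List.prefix_cons_inj d).mpr this)))
          · exact List.infix_cons (ihp.mpr (Or.inl hi))
        · exact List.infix_cons (ihp.mpr (Or.inr h2))

-- substring search in the whole source = substring search line by line (newline-free pattern)
theorem pvTarget (t src : String) (hne : t.toList ≠ [])
    (hb : t.toList.all (fun c => !pvIsB c && !(c == '\x0d') && !(c == '\n')) = true) :
    PySem.Str.isIn t src = (PySem.Str.splitlines src).any (fun line => PySem.Str.isIn t line) := by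
  have h : ∀ c ∈ t.toList, pvIsB c = false ∧ c ≠ '\x0d' ∧ c ≠ '\n' := by
    intro c hc
    have hx := List.all_eq_true.mp hb c hc
    simp only [Bool.and_eq_true, Bool.not_eq_true', beq_eq_false_iff_ne] at hx
    exact ⟨hx.1.1, hx.1.2, hx.2⟩
  have hmap : (PySem.Str.splitlines src).any (fun line => PySem.Str.isIn t line)
      = ((PySem.Str.splitlines src).map String.toList).any
          (fun l => PySem.Chars.isIn t.toList l) := by
    rw [List.any_map]
    simp [Function.comp_def, PySem.Str.isIn_eq]
  rw [PySem.Str.isIn_eq, hmap, PySem.Str.splitlines_map_toList, pvSplitlines_eq,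
    pvIsIn_lines _ hne h]

theorem pvIfOr (a b : Bool) : (if a then true else b) = (a || b) := by
  cases a <;> rfl

theorem pvMaster (ls : List String) (t1 t2 t3 t4 hl lo v : String → Bool) :
    (ls.any fun line => if t1 line || (t2 line || (t3 line || t4 line)) then true
      else v line && (hl line || lo line))
    = ((ls.any t1 || (ls.any t2 || (ls.any t3 || ls.any t4))) ||
       ls.any (fun line => if hl line && v line then true
          else if lo line && v line then true else false)) := by
  induction ls with
  | nil => rfl
  | cons a r ih =>
    simp only [List.any_cons]
    rw [ih]
    cases t1 a <;> cases t2 a <;> cases t3 a <;> cases t4 a <;>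
      cases hl a <;> cases lo a <;> cases v a <;>
      simp [Bool.or_comm]

-- ===== VERDICT (by name: the statement is the Claim_ definition above) =====
set_option maxRecDepth 8192 in
theorem contains_target_py_spec : Claim_equal_contains_target_py := by
  intro src _
  show contains_target_py src = contains_target_py_alt src
  unfold contains_target_py contains_target_py_alt pvLineTargets
  simp only [List.any_cons, List.any_nil, Bool.or_false]
  rw [pvIfOr, pvMaster]
  rw [pvTarget "SEND" src (by decide) (by decide),
    pvTarget "Transfer dest:" src (by decide) (by decide),
    pvTarget "selfdestruct" src (by decide) (by decide),
    pvTarget "suicide" src (by decide) (by decide)]
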